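-- pv_equiv track=rewrite | github.com/Ryzhtus/master-thesis | data/repeated_entities_statistics_ontonotes.py | make_sentence_mask
-- ===== SOURCE A (Python) =====
-- def make_sentence_mask(document, counter):
--     masks = []
--     for sentence in document:
--         sentence_mask = [0 for x in range(len(sentence))]
--         for key in list(counter.keys()):
--             entity = key
--             window_size = len(entity.split(' '))
--             for window_start in range(0, len(sentence) - window_size):
--                 if ' '.join(sentence[window_start: window_start + window_size]) == entity:
--                     for idx in range(window_start, window_start + window_size):
--                         sentence_mask[idx] = 1
--         masks.append(sentence_mask)
--
--     return masks
-- ===== SOURCE B (Python) =====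
-- def make_sentence_mask(document, counter):
--     # Group the entities by their word count once, so each sentence is scanned
--     # with one window pass per distinct size and an O(1) set lookup per window
--     # (instead of one pass per entity). Windows also include the final position
--     # n - size, which A's off-by-one range(0, n - size) never checks.
--     entities_by_size = {}
--     for key in counter.keys():
--         entities_by_size.setdefault(len(key.split(' ')), set()).add(key)
--     masks = []
--     for sentence in document:
--         n = len(sentence)
--         mask = [0] * n
--         for size, entities in entities_by_size.items():
--             for start in range(n - size + 1):
--                 if ' '.join(sentence[start:start + size]) in entities:
--                     for idx in range(start, start + size):
--                         mask[idx] = 1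
--         masks.append(mask)
--     return masks
-- ===== Notes on version B (the rewrite author's own statement) =====
-- stated objective: faster
-- what changed: B groups the entities by word count into one dict of sets built once, then scans each sentence with a single window pass per distinct size and an O(1) set lookup per window, instead of A's separate window scan per entity; B also checks the final window position n-size that A's range(0, n-size) misses.
-- intended difference: On inputs where some sentence's final window (its last len(key.split(' ')) tokens) joins to an entity of the counter, A's off-by-one range(0, len(sentence) - window_size) never checks that window and leaves its tokens unmasked (in particular the last token of a sentence is never masked), while B masks them; masking an entity at the end of a sentence is evidently the intended behaviour. — e.g. on make_sentence_mask([["New", "York"]], [("New York", 1)]): A returns [[0, 0]], B returns [[1, 1]]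
import Mathlib
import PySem

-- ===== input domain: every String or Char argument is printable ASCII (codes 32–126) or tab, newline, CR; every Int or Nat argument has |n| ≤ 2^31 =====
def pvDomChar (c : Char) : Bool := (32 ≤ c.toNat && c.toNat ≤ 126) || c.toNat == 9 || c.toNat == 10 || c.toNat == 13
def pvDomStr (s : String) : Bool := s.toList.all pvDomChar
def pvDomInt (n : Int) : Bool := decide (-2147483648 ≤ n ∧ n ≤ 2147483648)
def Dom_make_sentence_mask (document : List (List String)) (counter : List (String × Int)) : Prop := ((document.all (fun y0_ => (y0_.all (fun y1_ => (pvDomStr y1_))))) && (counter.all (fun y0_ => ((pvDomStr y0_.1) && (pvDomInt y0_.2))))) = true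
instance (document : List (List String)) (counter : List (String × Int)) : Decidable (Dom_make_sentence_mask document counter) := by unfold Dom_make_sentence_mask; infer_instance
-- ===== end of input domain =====

-- B groups the entities by word count into a dict of sets built once, then scans each sentence
-- with one window pass per distinct size and a set lookup per window (objective: faster); B also
-- checks the final window start n - size, which A's range(0, n - size) skips (see D_ below).

-- ===== PORT A =====
-- 'sentence_mask[idx] = 1': idx always lies in [0, len(sentence)) here (0 ≤ window_start and
-- window_start + window_size ≤ len(sentence)), so Python's assignment never raises; ported with
-- the total pySetD, exact on in-range indices.
def make_sentence_mask (document : List (List String)) (counter : List (String × Int)) : List (List Int) :=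
  document.foldl (fun masks sentence =>
    let sentence_mask : List Int := (PySem.List.pyRange 0 (sentence.length : Int) 1).map (fun _ => 0)
    let sentence_mask := ((PySem.Dict.ofList counter).keys).foldl (fun sentence_mask key =>
      let entity := key
      let window_size : Int := (((PySem.Str.split? entity " ").getD []).length : Int)
      (PySem.List.pyRange 0 ((sentence.length : Int) - window_size) 1).foldl (fun sentence_mask window_start =>
        if PySem.Str.join " " (PySem.List.slice sentence (some window_start) (some (window_start + window_size))) == entity then
          (PySem.List.pyRange window_start (window_start + window_size) 1).foldl
            (fun sentence_mask idx => PySem.List.pySetD sentence_mask idx 1) sentence_mask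
        else sentence_mask) sentence_mask) sentence_mask
    masks ++ [sentence_mask]) []

-- ===== PORT B =====
-- B-side helper: the loop "entities_by_size.setdefault(len(key.split(' ')), set()).add(key)"
def pv_bySize (counter : List (String × Int)) : PySem.Dict Int (PySem.Set String) :=
  ((PySem.Dict.ofList counter).keys).foldl (fun d key =>
    let size : Int := (((PySem.Str.split? key " ").getD []).length : Int)
    d.insert size ((d.getD size PySem.Set.empty).add key)) PySem.Dict.empty

-- 'mask[idx] = 1' is in range for the same reason as in port A: total pySetD, exact here.
def make_sentence_mask_alt (document : List (List String)) (counter : List (String × Int)) : List (List Int) :=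
  let entities_by_size := pv_bySize counter
  document.foldl (fun masks sentence =>
    let n : Int := (sentence.length : Int)
    let mask : List Int := List.replicate sentence.length 0
    let mask := entities_by_size.items.foldl (fun mask p =>
      (PySem.List.pyRange 0 (n - p.1 + 1) 1).foldl (fun mask start =>
        if p.2.contains (PySem.Str.join " " (PySem.List.slice sentence (some start) (some (start + p.1)))) then
          (PySem.List.pyRange start (start + p.1) 1).foldl
            (fun mask idx => PySem.List.pySetD mask idx 1) mask
        else mask) mask) mask
    masks ++ [mask]) []

-- ===== PRECONDITION & SPEC =====
-- the word count of an entity, stated on the input itself: one more than its number of ' '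
-- occurrences (equal to len(key.split(' ')); proved below as pvWs_eq_pvW)
def pvW (key : String) : Int := (PySem.Str.count key " " : Int) + 1

-- On inputs where some sentence's final window (its last len(key.split(' ')) tokens) joins to an
-- entity of the counter, A's off-by-one range(0, len(sentence) - window_size) never checks that
-- window and leaves its tokens unmasked (the last token of a sentence is never masked at all),
-- while B masks them; masking an entity at the end of a sentence is evidently the intended behaviour.
def D_make_sentence_mask (document : List (List String)) (counter : List (String × Int)) : Prop :=
  ∃ s ∈ document, ∃ p ∈ counter,
    pvW p.1 ≤ (s.length : Int) ∧
    PySem.Str.join " " (PySem.List.slice s (some ((s.length : Int) - pvW p.1)) (some (s.length : Int))) = p.1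
instance (document : List (List String)) (counter : List (String × Int)) : Decidable (D_make_sentence_mask document counter) := by unfold D_make_sentence_mask; infer_instance

def Spec_make_sentence_mask (document : List (List String)) (counter : List (String × Int)) (out : List (List Int)) : Prop := ¬ D_make_sentence_mask document counter → out = make_sentence_mask_alt document counter
instance (document : List (List String)) (counter : List (String × Int)) (out : List (List Int)) : Decidable (Spec_make_sentence_mask document counter out) := by unfold Spec_make_sentence_mask; infer_instance

def pvDiffWitness_make_sentence_mask : List (List String) × (List (String × Int)) :=
  ([["New", "York"]], [("New York", 1)])
def pvDiffWitnessOut_make_sentence_mask : (List (List Int)) × (List (List Int)) :=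
  ([[0, 0]], [[1, 1]])

-- ===== CLAIM (what is proved, stated in full; the proofs are below) =====
def Claim_unchanged_make_sentence_mask : Prop := ∀ (document : List (List String)) (counter : List (String × Int)), Dom_make_sentence_mask document counter → Spec_make_sentence_mask document counter (make_sentence_mask document counter)
def Claim_changed_make_sentence_mask : Prop := Dom_make_sentence_mask (pvDiffWitness_make_sentence_mask.1) (pvDiffWitness_make_sentence_mask.2) ∧ D_make_sentence_mask (pvDiffWitness_make_sentence_mask.1) (pvDiffWitness_make_sentence_mask.2) ∧ make_sentence_mask (pvDiffWitness_make_sentence_mask.1) (pvDiffWitness_make_sentence_mask.2) = pvDiffWitnessOut_make_sentence_mask.1 ∧ make_sentence_mask_alt (pvDiffWitness_make_sentence_mask.1) (pvDiffWitness_make_sentence_mask.2) = pvDiffWitnessOut_make_sentence_mask.2 ∧ pvDiffWitnessOut_make_sentence_mask.1 ≠ pvDiffWitnessOut_make_sentence_mask.2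
def Claim_exact_make_sentence_mask : Prop := ∀ (document : List (List String)) (counter : List (String × Int)), Dom_make_sentence_mask document counter → D_make_sentence_mask document counter → make_sentence_mask document counter ≠ make_sentence_mask_alt document counter

-- ===== LEMMAS AND PROOFS =====

-- the ports' form of the word count: len(key.split(' '))
def pvWs (key : String) : Int := (((PySem.Str.split? key " ").getD []).length : Int)

lemma pv_count_go_acc (sub : List Char) (fuel : Nat) : ∀ (l : List Char) (acc : Nat),
    PySem.Chars.count.go sub fuel l acc = PySem.Chars.count.go sub fuel l 0 + acc := by
  induction fuel with
  | zero => intro l acc; simp [PySem.Chars.count.go]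
  | succ n ih =>
    intro l acc
    match l with
    | [] => simp [PySem.Chars.count.go]
    | c :: rest =>
      rw [PySem.Chars.count.go, PySem.Chars.count.go]
      split
      · rw [ih _ (acc + 1), ih _ (0 + 1)]
        omega
      · exact ih rest acc

lemma pv_split_count_go (l : List Char) : ∀ (f1 f2 : Nat) (cur : List Char) (acc : List (List Char)),
    l.length ≤ f1 → l.length ≤ f2 →
    (PySem.Chars.splitOn.go [' '] f1 l cur acc).length
      = PySem.Chars.count.go [' '] f2 l 0 + acc.length + 1 := by
  induction l with
  | nil =>
    intro f1 f2 cur acc _ _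
    match f1, f2 with
    | 0, 0 => simp [PySem.Chars.splitOn.go, PySem.Chars.count.go]
    | 0, _ + 1 => simp [PySem.Chars.splitOn.go, PySem.Chars.count.go]
    | _ + 1, 0 => simp [PySem.Chars.splitOn.go, PySem.Chars.count.go]
    | _ + 1, _ + 1 => simp [PySem.Chars.splitOn.go, PySem.Chars.count.go]
  | cons c rest ih =>
    intro f1 f2 cur acc h1 h2
    match f1, f2 with
    | s1 + 1, s2 + 1 =>
      rw [PySem.Chars.splitOn.go, PySem.Chars.count.go]
      simp only [List.length_cons] at h1 h2
      by_cases hp : [' '].isPrefixOf (c :: rest) = true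
      · rw [if_pos hp, if_pos hp]
        have hdrop : List.drop [' '].length (c :: rest) = rest := by simp
        rw [hdrop, ih s1 s2 [] (cur.reverse :: acc) (by omega) (by omega),
          pv_count_go_acc [' '] s2 rest (0 + 1)]
        simp
        omega
      · rw [if_neg hp, if_neg hp]
        exact ih s1 s2 (c :: cur) acc (by omega) (by omega)

-- the ports' len(key.split(' ')) equals D_'s space count + 1
lemma pvWs_eq_pvW (k : String) : pvWs k = pvW k := by
  unfold pvWs pvW
  have h1 : PySem.Str.split? k " " = some ((PySem.Chars.splitOn k.toList " ".toList).map String.ofList) := by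
    simp [PySem.Str.split?, PySem.Chars.split?]
  rw [h1]
  have h2 : PySem.Str.count k " " = PySem.Chars.count k.toList " ".toList := by
    simp [PySem.Str.count]
  rw [h2]
  simp only [Option.getD_some, List.length_map]
  rw [PySem.Chars.splitOn]
  have h3 : PySem.Chars.count k.toList " ".toList
      = PySem.Chars.count.go " ".toList k.toList.length k.toList 0 := by
    rw [PySem.Chars.count, if_neg (by simp)]
  rw [h3]
  have hsp : " ".toList = [' '] := rfl
  rw [hsp]
  rw [pv_split_count_go k.toList (k.toList.length + 1) k.toList.length [] [] (by omega) (by omega)]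
  simp


-- the keys list both ports iterate (list(counter.keys()) / counter.keys())
def pvKs (counter : List (String × Int)) : List String := (PySem.Dict.ofList counter).keys

-- A's per-sentence loop body / B's per-sentence loop body, as standalone functions
def pvSentA (counter : List (String × Int)) (sentence : List String) : List Int :=
  ((PySem.Dict.ofList counter).keys).foldl (fun sentence_mask key =>
      (PySem.List.pyRange 0 ((sentence.length : Int) - pvWs key) 1).foldl (fun sentence_mask window_start =>
        if PySem.Str.join " " (PySem.List.slice sentence (some window_start) (some (window_start + pvWs key))) == key then
          (PySem.List.pyRange window_start (window_start + pvWs key) 1).foldl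
            (fun sentence_mask idx => PySem.List.pySetD sentence_mask idx 1) sentence_mask
        else sentence_mask) sentence_mask)
    ((PySem.List.pyRange 0 (sentence.length : Int) 1).map (fun _ => 0))

def pvSentB (counter : List (String × Int)) (sentence : List String) : List Int :=
  (pv_bySize counter).items.foldl (fun mask p =>
      (PySem.List.pyRange 0 ((sentence.length : Int) - p.1 + 1) 1).foldl (fun mask start =>
        if p.2.contains (PySem.Str.join " " (PySem.List.slice sentence (some start) (some (start + p.1)))) then
          (PySem.List.pyRange start (start + p.1) 1).foldl
            (fun mask idx => PySem.List.pySetD mask idx 1) mask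
        else mask) mask)
    (List.replicate sentence.length 0)

lemma pv_A_eq_map (document : List (List String)) (counter : List (String × Int)) :
    make_sentence_mask document counter = document.map (pvSentA counter) := by
  show document.foldl (fun masks sentence => masks ++ [pvSentA counter sentence]) []
    = document.map (pvSentA counter)
  rw [PySem.List.foldl_append_singleton_eq_map]
  simp

lemma pv_B_eq_map (document : List (List String)) (counter : List (String × Int)) :
    make_sentence_mask_alt document counter = document.map (pvSentB counter) := by
  show document.foldl (fun masks sentence => masks ++ [pvSentB counter sentence]) []
    = document.map (pvSentB counter)
  rw [PySem.List.foldl_append_singleton_eq_map]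
  simp

lemma pv_len_foldl {α : Type} (L : List α) (F : List Int → α → List Int)
    (h : ∀ m x, x ∈ L → (F m x).length = m.length) (m : List Int) :
    (L.foldl F m).length = m.length := by
  induction L generalizing m with
  | nil => rfl
  | cons x t ih =>
    rw [List.foldl_cons]
    rw [ih (fun m y hy => h m y (List.mem_cons_of_mem _ hy)) (F m x),
      h m x List.mem_cons_self]

-- a fold whose every step either sets positions to 1 (when Q fires) or leaves the list alone
lemma pv_mark_foldl {α : Type} (L : List α) (F : List Int → α → List Int) (Q : α → Bool)
    (j : Nat)
    (hlen : ∀ m x, x ∈ L → (F m x).length = m.length)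
    (hget : ∀ m x, x ∈ L → j < m.length →
      (F m x).getD j 0 = if Q x then 1 else m.getD j 0)
    (m : List Int) (hj : j < m.length) :
    (L.foldl F m).getD j 0 = if L.any Q then 1 else m.getD j 0 := by
  induction L generalizing m with
  | nil => simp
  | cons x t ih =>
    have hm' : (F m x).length = m.length := hlen m x List.mem_cons_self
    rw [List.foldl_cons,
      ih (fun m y hy => hlen m y (List.mem_cons_of_mem _ hy))
         (fun m y hy => hget m y (List.mem_cons_of_mem _ hy)) (F m x) (by omega),
      hget m x List.mem_cons_self hj, List.any_cons]
    cases hQ : Q x <;> cases hT : t.any Q <;> simp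

lemma pv_mark_range (a b : Int) (ha : 0 ≤ a) (m : List Int) (j : Nat) (hj : j < m.length) :
    ((PySem.List.pyRange a b 1).foldl (fun sm idx => PySem.List.pySetD sm idx 1) m).getD j 0
      = if a ≤ (j : Int) ∧ (j : Int) < b then 1 else m.getD j 0 := by
  rw [pv_mark_foldl (PySem.List.pyRange a b 1) _ (fun idx => idx == (j : Int)) j
    (fun m x _ => PySem.List.length_pySetD m x 1) ?hget m hj]
  case hget =>
    intro m idx hmem hj'
    have h0 : 0 ≤ idx := le_trans ha (PySem.List.mem_pyRange_one.mp hmem).1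
    rw [PySem.List.pySetD_of_nonneg m 1 h0]
    rw [List.getD_eq_getElem?_getD, List.getD_eq_getElem?_getD, List.getElem?_set]
    by_cases he : idx = (j : Int)
    · have : idx.toNat = j := by omega
      simp [he, hj']
    · have : idx.toNat ≠ j := by omega
      simp [this, he]
  · by_cases h : a ≤ (j : Int) ∧ (j : Int) < b
    · have hx : (PySem.List.pyRange a b 1).any (fun idx => idx == (j : Int)) = true :=
        List.any_eq_true.mpr ⟨(j : Int), PySem.List.mem_pyRange_one.mpr h, by simp⟩
      simp [hx, h]
    · have hx : (PySem.List.pyRange a b 1).any (fun idx => idx == (j : Int)) = false := by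
        rw [List.any_eq_false]
        intro x hx'
        simp only [beq_iff_eq]
        rintro rfl
        exact h (PySem.List.mem_pyRange_one.mp hx')
      simp [hx, h]

lemma pv_mark_range_len (a b : Int) (m : List Int) :
    ((PySem.List.pyRange a b 1).foldl (fun sm idx => PySem.List.pySetD sm idx 1) m).length
      = m.length :=
  pv_len_foldl _ _ (fun m x _ => PySem.List.length_pySetD m x 1) m

-- the generic window scan: over starts in [0, hi), if condition C fires mark [st, st + w)
lemma pv_winfold_len (hi w : Int) (C : Int → Bool) (m : List Int) :
    ((PySem.List.pyRange 0 hi 1).foldl (fun sm st =>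
        if C st then
          (PySem.List.pyRange st (st + w) 1).foldl
            (fun sm idx => PySem.List.pySetD sm idx 1) sm
        else sm) m).length = m.length := by
  apply pv_len_foldl
  intro m st _
  split
  · exact pv_mark_range_len _ _ _
  · rfl

lemma pv_winfold_getD (hi w : Int) (C : Int → Bool) (j : Nat) (m : List Int)
    (hj : j < m.length) :
    ((PySem.List.pyRange 0 hi 1).foldl (fun sm st =>
        if C st then
          (PySem.List.pyRange st (st + w) 1).foldl
            (fun sm idx => PySem.List.pySetD sm idx 1) sm
        else sm) m).getD j 0
      = if (PySem.List.pyRange 0 hi 1).any (fun st =>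
            C st && decide (st ≤ (j : Int) ∧ (j : Int) < st + w)) then 1 else m.getD j 0 := by
  apply pv_mark_foldl _ _ _ j
  · intro m st _
    split
    · exact pv_mark_range_len _ _ _
    · rfl
  · intro m st hmem hj'
    have h0 : 0 ≤ st := (PySem.List.mem_pyRange_one.mp hmem).1
    by_cases hC : C st
    · rw [if_pos hC, pv_mark_range st (st + w) h0 m j hj', hC]
      by_cases hb : st ≤ (j : Int) ∧ (j : Int) < st + w <;> simp [hb]
    · rw [if_neg hC]
      simp [Bool.eq_false_iff.mpr hC]
  · exact hj

-- Bool characterisations of the two per-sentence masks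
def pvCovA (counter : List (String × Int)) (s : List String) (j : Nat) : Bool :=
  (pvKs counter).any fun key =>
    (PySem.List.pyRange 0 ((s.length : Int) - pvWs key) 1).any fun st =>
      (PySem.Str.join " " (PySem.List.slice s (some st) (some (st + pvWs key))) == key)
        && decide (st ≤ (j : Int) ∧ (j : Int) < st + pvWs key)

def pvCovB (counter : List (String × Int)) (s : List String) (j : Nat) : Bool :=
  (pv_bySize counter).items.any fun p =>
    (PySem.List.pyRange 0 ((s.length : Int) - p.1 + 1) 1).any fun st =>
      p.2.contains (PySem.Str.join " " (PySem.List.slice s (some st) (some (st + p.1))))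
        && decide (st ≤ (j : Int) ∧ (j : Int) < st + p.1)

lemma pvSentA_length (counter : List (String × Int)) (s : List String) :
    (pvSentA counter s).length = s.length := by
  unfold pvSentA
  rw [pv_len_foldl _ _ (fun m key _ => pv_winfold_len _ (pvWs key) _ m)]
  simp [PySem.List.length_pyRange_one]

lemma pvSentB_length (counter : List (String × Int)) (s : List String) :
    (pvSentB counter s).length = s.length := by
  unfold pvSentB
  rw [pv_len_foldl _ _ (fun m p _ => pv_winfold_len _ p.1 _ m)]
  simp

lemma pvSentA_getD (counter : List (String × Int)) (s : List String) (j : Nat)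
    (hj : j < s.length) :
    (pvSentA counter s).getD j 0 = if pvCovA counter s j then 1 else 0 := by
  unfold pvSentA pvCovA pvKs
  rw [pv_mark_foldl _ _ _ j (fun m key _ => pv_winfold_len _ (pvWs key) _ m)
    (fun m key _ hj' => pv_winfold_getD _ (pvWs key) _ j m hj') _
    (by simp [PySem.List.length_pyRange_one]; omega)]
  congr 1
  rw [List.getD_eq_getElem?_getD, List.getElem?_map, PySem.List.getElem?_pyRange_one]
  have : j < ((s.length : Int) - 0).toNat := by omega
  simp [hj]

lemma pvSentB_getD (counter : List (String × Int)) (s : List String) (j : Nat)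
    (hj : j < s.length) :
    (pvSentB counter s).getD j 0 = if pvCovB counter s j then 1 else 0 := by
  unfold pvSentB pvCovB
  rw [pv_mark_foldl _ _ _ j (fun m p _ => pv_winfold_len _ p.1 _ m)
    (fun m p _ hj' => pv_winfold_getD _ p.1 _ j m hj') _ (by simpa using hj)]
  congr 1
  rw [List.getD_eq_getElem?_getD, List.getElem?_replicate]
  simp [hj]

lemma pv_getD_mem (d : PySem.Dict Int (PySem.Set String)) (hd : d.keys.Nodup) (size : Int) (k : String) :
    k ∈ d.getD size PySem.Set.empty ↔ ∃ e, (size, e) ∈ d.items ∧ k ∈ e := by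
  cases h : d.get? size with
  | none =>
    have hg : d.getD size PySem.Set.empty = PySem.Set.empty := by
      simp [PySem.Dict.getD, h]
    rw [hg]
    simp only [PySem.Set.empty]
    constructor
    · intro hk; exact absurd hk (List.not_mem_nil)
    · rintro ⟨e, he, hke⟩
      have : d.get? size = some e := (PySem.Dict.get?_eq_some_iff_mem_items d size e hd).mpr he
      rw [h] at this; exact absurd this (by simp)
  | some e =>
    have hg : d.getD size PySem.Set.empty = e := by simp [PySem.Dict.getD, h]
    rw [hg]
    constructor
    · intro hk
      exact ⟨e, (PySem.Dict.get?_eq_some_iff_mem_items d size e hd).mp h, hk⟩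
    · rintro ⟨e', he', hke'⟩
      have : d.get? size = some e' := (PySem.Dict.get?_eq_some_iff_mem_items d size e' hd).mpr he'
      rw [h] at this
      cases this
      exact hke'

lemma pv_build_spec (ks : List String) (d : PySem.Dict Int (PySem.Set String))
    (hd : d.keys.Nodup) (size : Int) (k : String) :
    (∃ e, (size, e) ∈ (ks.foldl (fun d key =>
        d.insert (pvWs key) ((d.getD (pvWs key) PySem.Set.empty).add key)) d).items ∧ k ∈ e)
      ↔ ((∃ e, (size, e) ∈ d.items ∧ k ∈ e) ∨ (k ∈ ks ∧ pvWs k = size)) := by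
  induction ks generalizing d with
  | nil => simp
  | cons key t ih =>
    rw [List.foldl_cons]
    set d' := d.insert (pvWs key) ((d.getD (pvWs key) PySem.Set.empty).add key) with hd'
    have hnd' : d'.keys.Nodup := PySem.Dict.nodup_keys_insert _ _ _ hd
    rw [ih d' hnd']
    have hstep : (∃ e, (size, e) ∈ d'.items ∧ k ∈ e)
        ↔ ((∃ e, (size, e) ∈ d.items ∧ k ∈ e) ∨ (k = key ∧ pvWs key = size)) := by
      constructor
      · rintro ⟨e, he, hke⟩
        rcases (PySem.Dict.mem_items_insert d _ _ _).mp he with h1 | ⟨h2, h3⟩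
        · rw [Prod.mk.injEq] at h1
          obtain ⟨h1a, h1b⟩ := h1
          subst h1b
          rcases (PySem.Set.mem_add _ _ _).mp hke with h4 | h4
          · rw [← h1a] at h4
            exact Or.inl ((pv_getD_mem d hd _ k).mp h4)
          · exact Or.inr ⟨h4, h1a.symm⟩
        · exact Or.inl ⟨e, h2, hke⟩
      · rintro (⟨e, he, hke⟩ | ⟨hkk, hw⟩)
        · by_cases hsz : size = pvWs key
          · refine ⟨(d.getD (pvWs key) PySem.Set.empty).add key, ?_, ?_⟩
            · rw [hsz]; exact (PySem.Dict.mem_items_insert d _ _ _).mpr (Or.inl rfl)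
            · refine (PySem.Set.mem_add _ _ _).mpr (Or.inl ((pv_getD_mem d hd _ k).mpr ⟨e, ?_, hke⟩))
              rw [← hsz]; exact he
          · exact ⟨e, (PySem.Dict.mem_items_insert d _ _ _).mpr (Or.inr ⟨he, hsz⟩), hke⟩
        · subst hkk
          rw [← hw]
          exact ⟨(d.getD (pvWs k) PySem.Set.empty).add k,
            (PySem.Dict.mem_items_insert d _ _ _).mpr (Or.inl rfl),
            (PySem.Set.mem_add _ _ _).mpr (Or.inr rfl)⟩
    rw [hstep]
    simp only [List.mem_cons]
    constructor
    · rintro ((h | ⟨rfl, hw⟩) | h)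
      · exact Or.inl h
      · exact Or.inr ⟨Or.inl rfl, hw⟩
      · exact Or.inr ⟨Or.inr h.1, h.2⟩
    · rintro (h | ⟨(rfl | hm), hw⟩)
      · exact Or.inl (Or.inl h)
      · exact Or.inl (Or.inr ⟨rfl, hw⟩)
      · exact Or.inr ⟨hm, hw⟩

-- the grouping dict: (size, e) ∈ items with k ∈ e  ↔  k is a counter key of word count size
lemma pv_mem_bySize (counter : List (String × Int)) (size : Int) (k : String) :
    (∃ e, (size, e) ∈ (pv_bySize counter).items ∧ k ∈ e)
      ↔ (k ∈ pvKs counter ∧ pvWs k = size) := by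
  rw [show pv_bySize counter = (pvKs counter).foldl (fun d key =>
      d.insert (pvWs key) ((d.getD (pvWs key) PySem.Set.empty).add key)) PySem.Dict.empty from rfl]
  rw [pv_build_spec (pvKs counter) PySem.Dict.empty PySem.Dict.nodup_keys_empty size k]
  simp [PySem.Dict.empty]

lemma pv_mem_ks (counter : List (String × Int)) (k : String) :
    k ∈ pvKs counter ↔ k ∈ counter.map Prod.fst := by
  unfold pvKs
  rw [show PySem.Dict.ofList counter = counter.foldl
      (fun (acc : PySem.Dict String Int) p => acc.insert p.1 p.2) PySem.Dict.empty from rfl]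
  rw [PySem.Dict.keys_foldl_insert_key counter (fun p => p.1) (fun _ p => p.2) PySem.Dict.empty]
  rw [show (PySem.Dict.empty : PySem.Dict String Int).keys = [] from rfl]
  rw [PySem.Set.mem_update]
  simp

lemma pv_go_ne_nil (sep : List Char) (fuel : Nat) : ∀ (l cur : List Char) (acc : List (List Char)),
    PySem.Chars.splitOn.go sep fuel l cur acc ≠ [] := by
  induction fuel with
  | zero => intro l cur acc; simp [PySem.Chars.splitOn.go]
  | succ n ih =>
    intro l cur acc
    match l with
    | [] => simp [PySem.Chars.splitOn.go]
    | c :: rest =>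
      rw [PySem.Chars.splitOn.go]
      split
      · exact ih _ _ _
      · exact ih _ _ _

lemma pvWs_pos (k : String) : 1 ≤ pvWs k := by
  unfold pvWs
  simp only [PySem.Str.split?, PySem.Chars.split?]
  have h := pv_go_ne_nil " ".toList (k.toList.length + 1) k.toList [] []
  simp only [PySem.Chars.splitOn] at *
  have : 0 < (PySem.Chars.splitOn.go " ".toList (k.toList.length + 1) k.toList [] []).length :=
    List.length_pos_iff.mpr h
  rw [if_neg (by simp)]
  simp only [Option.map_some, Option.getD_some, List.length_map]
  omega

lemma pvCovA_iff (counter : List (String × Int)) (s : List String) (j : Nat) :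
    pvCovA counter s j = true ↔
      ∃ k ∈ pvKs counter, ∃ st : Int, 0 ≤ st ∧ st < (s.length : Int) - pvWs k ∧
        PySem.Str.join " " (PySem.List.slice s (some st) (some (st + pvWs k))) = k ∧
        st ≤ (j : Int) ∧ (j : Int) < st + pvWs k := by
  simp only [pvCovA, List.any_eq_true, PySem.List.mem_pyRange_one, Bool.and_eq_true,
    beq_iff_eq, decide_eq_true_eq]
  constructor
  · rintro ⟨k, hk, st, ⟨h0, hlt⟩, hjoin, hb1, hb2⟩
    exact ⟨k, hk, st, h0, hlt, hjoin, hb1, hb2⟩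
  · rintro ⟨k, hk, st, h0, hlt, hjoin, hb1, hb2⟩
    exact ⟨k, hk, st, ⟨h0, hlt⟩, hjoin, hb1, hb2⟩

lemma pvCovB_iff (counter : List (String × Int)) (s : List String) (j : Nat) :
    pvCovB counter s j = true ↔
      ∃ k ∈ pvKs counter, ∃ st : Int, 0 ≤ st ∧ st < (s.length : Int) - pvWs k + 1 ∧
        PySem.Str.join " " (PySem.List.slice s (some st) (some (st + pvWs k))) = k ∧
        st ≤ (j : Int) ∧ (j : Int) < st + pvWs k := by
  simp only [pvCovB, List.any_eq_true, PySem.List.mem_pyRange_one, Bool.and_eq_true,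
    decide_eq_true_eq]
  constructor
  · rintro ⟨p, hp, st, ⟨h0, hlt⟩, hmem, hb⟩
    obtain ⟨hks, hwsz⟩ := (pv_mem_bySize counter p.1
      (PySem.Str.join " " (PySem.List.slice s (some st) (some (st + p.1))))).mp
        ⟨p.2, hp, List.contains_iff_mem.mp hmem⟩
    exact ⟨_, hks, st, h0, by rw [hwsz]; exact hlt, by rw [hwsz], by rw [hwsz]; exact hb⟩
  · rintro ⟨k, hk, st, h0, hlt, hjoin, hb⟩
    obtain ⟨e, he, hke⟩ := (pv_mem_bySize counter (pvWs k) k).mpr ⟨hk, rfl⟩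
    refine ⟨(pvWs k, e), he, st, ⟨h0, hlt⟩, ?_, hb⟩
    exact List.contains_iff_mem.mpr (by rw [hjoin]; exact hke)

-- per-sentence agreement when the sentence has no final-window entity match
lemma pvSent_eq (counter : List (String × Int)) (s : List String)
    (h : ∀ k ∈ pvKs counter, ¬ (pvWs k ≤ (s.length : Int) ∧
      PySem.Str.join " " (PySem.List.slice s (some ((s.length : Int) - pvWs k)) (some (s.length : Int))) = k)) :
    pvSentA counter s = pvSentB counter s := by
  have hcov : ∀ j : Nat, j < s.length → pvCovA counter s j = pvCovB counter s j := by
    intro j hj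
    rw [Bool.eq_iff_iff, pvCovA_iff, pvCovB_iff]
    constructor
    · rintro ⟨k, hk, st, h0, hlt, hjoin, hb⟩
      exact ⟨k, hk, st, h0, by omega, hjoin, hb⟩
    · rintro ⟨k, hk, st, h0, hlt, hjoin, hb⟩
      refine ⟨k, hk, st, h0, ?_, hjoin, hb⟩
      rcases lt_or_eq_of_le (show st ≤ (s.length : Int) - pvWs k by omega) with hc | hc
      · exact hc
      · exfalso
        apply h k hk
        refine ⟨by omega, ?_⟩
        have h1 : (s.length : Int) - pvWs k = st := hc.symm
        have h2 : (s.length : Int) = st + pvWs k := by omega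
        rw [h1, h2]
        exact hjoin
  apply List.ext_getElem
  · rw [pvSentA_length, pvSentB_length]
  · intro i h1 h2
    have hi : i < s.length := by rw [pvSentA_length] at h1; exact h1
    have gA := pvSentA_getD counter s i hi
    have gB := pvSentB_getD counter s i hi
    rw [List.getD_eq_getElem _ _ h1] at gA
    rw [List.getD_eq_getElem _ _ h2] at gB
    rw [gA, gB, hcov i hi]

-- ===== VERDICT (by name: the statement is the Claim_ definition above) =====
theorem make_sentence_mask_spec : Claim_unchanged_make_sentence_mask := by
  intro document counter _ hND
  rw [pv_A_eq_map, pv_B_eq_map]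
  apply List.map_congr_left
  intro s hs
  apply pvSent_eq
  intro k hk hbad
  rw [pvWs_eq_pvW k] at hbad
  apply hND
  obtain ⟨p, hp, hp1⟩ := List.mem_map.mp ((pv_mem_ks counter k).mp hk)
  exact ⟨s, hs, p, hp, by rw [hp1]; exact hbad.1, by rw [hp1]; exact hbad.2⟩

theorem make_sentence_mask_changed : Claim_changed_make_sentence_mask := by
  unfold Claim_changed_make_sentence_mask; decide

theorem make_sentence_mask_tight : Claim_exact_make_sentence_mask := by
  intro document counter _ hD hEq
  obtain ⟨s, hs, p, hp, hw0, hjoin0⟩ := hD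
  have hk : p.1 ∈ pvKs counter :=
    (pv_mem_ks counter p.1).mpr (List.mem_map.mpr ⟨p, hp, rfl⟩)
  have hw : pvWs p.1 ≤ (s.length : Int) := by rw [pvWs_eq_pvW]; exact hw0
  have hjoin : PySem.Str.join " " (PySem.List.slice s
      (some ((s.length : Int) - pvWs p.1)) (some (s.length : Int))) = p.1 := by
    rw [pvWs_eq_pvW]; exact hjoin0
  have hwpos := pvWs_pos p.1
  have hn : 1 ≤ s.length := by omega
  set j : Nat := s.length - 1 with hjdef
  have hj : j < s.length := by omega
  have hjcast : (j : Int) = (s.length : Int) - 1 := by omega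
  -- A never marks the last index of a sentence
  have hA : pvCovA counter s j = false := by
    rw [Bool.eq_false_iff]
    intro hc
    obtain ⟨k, hk', st, h0, hlt, hjoin', hb1, hb2⟩ := (pvCovA_iff counter s j).mp hc
    omega
  -- B marks it through the final window match
  have hB : pvCovB counter s j = true := by
    rw [pvCovB_iff]
    refine ⟨p.1, hk, (s.length : Int) - pvWs p.1, by omega, by omega, ?_, by omega, by omega⟩
    have harg : (s.length : Int) - pvWs p.1 + pvWs p.1 = (s.length : Int) := by omega
    rw [harg]
    exact hjoin
  -- extract the per-sentence disagreement from the list equality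
  rw [pv_A_eq_map, pv_B_eq_map] at hEq
  obtain ⟨i, hi, hsi⟩ := List.mem_iff_getElem.mp hs
  have : pvSentA counter s = pvSentB counter s := by
    have := congrArg (fun l => l[i]?) hEq
    simp only [List.getElem?_map] at this
    rw [List.getElem?_eq_getElem hi, hsi] at this
    simp at this
    exact this
  have gA := pvSentA_getD counter s j hj
  have gB := pvSentB_getD counter s j hj
  rw [this, gB, hB] at gA
  rw [hA] at gA
  simp at gA
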